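-- pv_equiv track=rewrite | github.com/chuqixiaozhu/music_stream_schedule | get_marks.py | is_same_interval
-- ===== SOURCE A (Python) =====
-- def is_same_interval(act, pre, marks):
--     total = len(marks)
--
--     for i in range(total-1):
--         lower = marks[i]
--         upper = marks[i+1]
--         if i == 0:
--             if (lower < act and act < upper) \
--                 and (lower < pre and pre < upper):
--                 return True
--             continue
--         if (lower <= act and act < upper) \
--             and (lower <= pre and pre < upper):
--             return True
--     return False
-- ===== SOURCE B (Python) =====
-- def is_same_interval(act, pre, marks):
--     def containing(x):
--         return {i for i in range(len(marks) - 1)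
--                 if (marks[i] < x if i == 0 else marks[i] <= x) and x < marks[i + 1]}
--     return bool(containing(act) & containing(pre))
-- ===== Notes on version B (the rewrite author's own statement) =====
-- stated objective: alternative
-- what changed: A interleaves both membership tests in one loop with an early return; B builds the set of interval indices containing act and the set containing pre and returns whether the two sets intersect.
import Mathlib
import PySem

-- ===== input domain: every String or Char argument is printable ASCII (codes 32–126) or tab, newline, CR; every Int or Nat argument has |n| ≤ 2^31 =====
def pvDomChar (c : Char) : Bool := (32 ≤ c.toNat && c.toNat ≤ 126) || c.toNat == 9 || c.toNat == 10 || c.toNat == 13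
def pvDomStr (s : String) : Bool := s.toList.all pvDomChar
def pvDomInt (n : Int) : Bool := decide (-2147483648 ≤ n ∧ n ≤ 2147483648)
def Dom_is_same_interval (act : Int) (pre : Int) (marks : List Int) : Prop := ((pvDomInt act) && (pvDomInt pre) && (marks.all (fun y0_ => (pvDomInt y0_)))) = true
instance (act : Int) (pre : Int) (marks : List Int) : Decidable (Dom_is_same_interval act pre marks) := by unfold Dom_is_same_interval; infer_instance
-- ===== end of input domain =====

-- ===== PORT A =====
-- literal port of A: loop over range(total-1) with early return = List.any;
-- marks[i]/marks[i+1] are always in range here, so pyGetD's default 0 is never used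
def is_same_interval (act : Int) (pre : Int) (marks : List Int) : Bool :=
  let total : Int := marks.length
  (PySem.List.pyRange 0 (total - 1) 1).any (fun i =>
    let lower := PySem.List.pyGetD marks i 0
    let upper := PySem.List.pyGetD marks (i + 1) 0
    if i == 0 then
      (lower < act && act < upper) && (lower < pre && pre < upper)
    else
      (lower ≤ act && act < upper) && (lower ≤ pre && pre < upper))

-- B (alternative decomposition): build the set of containing interval indices for each value, then intersect.
-- ===== PORT B =====
-- port of B: the set of interval indices containing x (distinct by construction), then intersection
def containingIdx (marks : List Int) (x : Int) : List Int :=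
  (PySem.List.pyRange 0 ((marks.length : Int) - 1) 1).filter (fun i =>
    (if i == 0 then PySem.List.pyGetD marks i 0 < x else PySem.List.pyGetD marks i 0 ≤ x)
      && x < PySem.List.pyGetD marks (i + 1) 0)

def is_same_interval_alt (act : Int) (pre : Int) (marks : List Int) : Bool :=
  !((containingIdx marks act).filter (fun i => (containingIdx marks pre).contains i)).isEmpty

-- ===== PRECONDITION & SPEC =====
def Spec_is_same_interval (act : Int) (pre : Int) (marks : List Int) (out : Bool) : Prop := out = is_same_interval_alt act pre marks
instance (act : Int) (pre : Int) (marks : List Int) (out : Bool) : Decidable (Spec_is_same_interval act pre marks out) := by unfold Spec_is_same_interval; infer_instance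

-- ===== CLAIM (what is proved, stated in full; the proofs are below) =====
def Claim_equal_is_same_interval : Prop := ∀ (act : Int) (pre : Int) (marks : List Int), Dom_is_same_interval act pre marks → Spec_is_same_interval act pre marks (is_same_interval act pre marks)

-- ===== LEMMAS AND PROOFS =====

lemma any_eq_inter (l : List Int) (f g : Int → Bool) :
    (l.any (fun i => f i && g i))
      = !((l.filter f).filter (fun i => (l.filter g).contains i)).isEmpty := by
  rw [Bool.eq_iff_iff]
  simp only [List.any_eq_true, Bool.and_eq_true, Bool.not_eq_true',
    List.isEmpty_eq_false_iff, ne_eq, List.eq_nil_iff_forall_not_mem, not_forall,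
    List.mem_filter, List.contains_eq_mem, decide_eq_true_eq, not_not]
  constructor
  · rintro ⟨a, ha, hf, hg⟩
    exact ⟨a, ⟨ha, hf⟩, ha, hg⟩
  · rintro ⟨a, ⟨ha, hf⟩, _, hg⟩
    exact ⟨a, ha, hf, hg⟩

-- ===== VERDICT (by name: the statement is the Claim_ definition above) =====
theorem is_same_interval_spec : Claim_equal_is_same_interval := by
  intro act pre marks _
  unfold Spec_is_same_interval is_same_interval is_same_interval_alt containingIdx
  rw [← any_eq_inter]
  exact congrArg (List.any _) (funext fun i => by
    by_cases hi : i == 0 <;> simp [hi])
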